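-- pv_equiv track=rewrite | github.com/MakC-Ukr/IR-Assignment-2 | Q2/main.py | get_df_icf_matrix
-- ===== SOURCE A (Python) =====
-- def get_df_icf_matrix(X_t, Y_c):
--     # Calculating tf(c,d)
--     tf = {}
--     for i in range(len(X_t)):
--         doc_dict = {}
--         for word in X_t[i].split():
--             if word not in doc_dict:
--                 doc_dict[word] = 1
--             else:
--                 doc_dict[word] += 1
--         tf[i] = doc_dict
--
--     # Calculating df(t,c)
--     df={}
--     for i in range(len(X_t)):
--         category = Y_c[i]
--         for word in X_t[i].split():
--             if word not in df:
--                 df[word] = {}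
--
--             if category not in df[word]:
--                 df[word][category] = 1
--             else:
--                 df[word][category] += 1
--
--     #
--     return tf, df
-- ===== SOURCE B (Python) =====
-- def get_df_icf_matrix(X_t, Y_c):
--     # One flat pass over the corpus: count (doc, word) and (word, category)
--     # pairs in two flat, pair-keyed counters, then group the flat counters
--     # into the nested tf / df tables.  Correct because a flat dict keyed on
--     # pairs holds exactly the nested counts, and its first-occurrence key
--     # order, grouped on the first component, reproduces the nested tables'
--     # insertion order.
--     doc_word = {}
--     word_cat = {}
--     dw_get = doc_word.get
--     wc_get = word_cat.get
--     for i, doc in enumerate(X_t):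
--         cat = Y_c[i]
--         for w in doc.split():
--             k = (i, w)
--             doc_word[k] = dw_get(k, 0) + 1
--             k2 = (w, cat)
--             word_cat[k2] = wc_get(k2, 0) + 1
--
--     tf = {i: {} for i in range(len(X_t))}
--     for (i, w), n in doc_word.items():
--         tf[i][w] = n
--
--     df = {}
--     for (w, c), n in word_cat.items():
--         df.setdefault(w, {})[c] = n
--
--     return tf, df
-- ===== Notes on version B (the rewrite author's own statement) =====
-- stated objective: alternative
-- what changed: B replaces A's two nested counting passes over nested dicts by ONE flat pass that counts (doc,word) and (word,category) PAIRS in two flat pair-keyed counters, and then groups each flat counter into the nested tf / df tables; correctness rests on the flat counters holding exactly the nested counts and on their first-occurrence key order reproducing the nested insertion order.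
import Mathlib
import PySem

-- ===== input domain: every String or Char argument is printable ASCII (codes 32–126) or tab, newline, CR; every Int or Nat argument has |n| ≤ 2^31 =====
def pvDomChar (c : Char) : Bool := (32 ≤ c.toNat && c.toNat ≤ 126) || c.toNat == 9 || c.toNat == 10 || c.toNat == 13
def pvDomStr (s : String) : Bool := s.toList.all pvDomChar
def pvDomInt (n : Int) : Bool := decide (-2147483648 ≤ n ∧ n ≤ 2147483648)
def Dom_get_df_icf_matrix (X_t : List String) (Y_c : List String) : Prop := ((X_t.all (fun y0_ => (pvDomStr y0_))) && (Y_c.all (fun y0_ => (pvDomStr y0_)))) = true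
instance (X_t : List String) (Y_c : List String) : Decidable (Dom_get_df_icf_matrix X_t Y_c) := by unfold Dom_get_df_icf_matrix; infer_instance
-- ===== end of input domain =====

-- B counts (doc,word) and (word,category) PAIRS in two flat pair-keyed counters in one
-- pass and then groups them into the nested tf / df tables; objective: alternative.

-- ===== PORT A =====
def get_df_icf_matrix (X_t : List String) (Y_c : List String) :
    (List (Int × List (String × Int))) × (List (String × List (String × Int))) :=
  -- tf: for each i, count every token of X_t[i] one by one
  let tf : PySem.Dict Int (PySem.Dict String Int) :=
    (PySem.List.enumerate X_t).foldl (fun tf p =>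
      tf.insert p.1 ((PySem.Str.split₀ p.2).foldl
        (fun d w => if d.contains w then d.modify w 0 (· + 1) else d.insert w 1)
        PySem.Dict.empty)) PySem.Dict.empty
  -- df: second pass over every raw token, incrementing df[word][category] by 1
  let df : PySem.Dict String (PySem.Dict String Int) :=
    (PySem.List.enumerate X_t).foldl (fun df p =>
      let category := (PySem.List.pyGet? Y_c p.1).getD ""  -- in range under Pre_
      (PySem.Str.split₀ p.2).foldl (fun df w =>
        let df1 := if df.contains w then df else df.insert w PySem.Dict.empty
        if (df1.getD w PySem.Dict.empty).contains category then
          df1.modify w PySem.Dict.empty (fun m => m.modify category 0 (· + 1))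
        else
          df1.modify w PySem.Dict.empty (fun m => m.insert category 1)) df)
      PySem.Dict.empty
  (tf.items.map (fun q => (q.1, q.2.items)), df.items.map (fun q => (q.1, q.2.items)))

-- ===== PORT B =====
def get_df_icf_matrix_alt (X_t : List String) (Y_c : List String) :
    (List (Int × List (String × Int))) × (List (String × List (String × Int))) :=
  -- one flat pass: doc_word[(i,w)] and word_cat[(w,cat)] counters over the corpus
  let st :=
    (PySem.List.enumerate X_t).foldl (fun st p =>
      let cat := (PySem.List.pyGet? Y_c p.1).getD ""  -- Y_c[i]; in range under Pre_
      (PySem.Str.split₀ p.2).foldl (fun st w =>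
        (st.1.insert (p.1, w) (st.1.getD (p.1, w) 0 + 1),
         st.2.insert (w, cat) (st.2.getD (w, cat) 0 + 1))) st)
      ((PySem.Dict.empty : PySem.Dict (Int × String) Int),
       (PySem.Dict.empty : PySem.Dict (String × String) Int))
  -- tf = {i: {} for i in range(len(X_t))}, then tf[i][w] = n from doc_word's items
  let tf0 : PySem.Dict Int (PySem.Dict String Int) :=
    (PySem.List.pyRange 0 (X_t.length : Int) 1).foldl
      (fun t i => t.insert i PySem.Dict.empty) PySem.Dict.empty
  let tf := st.1.items.foldl (fun t q =>
      t.modify q.1.1 PySem.Dict.empty (fun m => m.insert q.1.2 q.2)) tf0  -- tf[i] always present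
  -- df.setdefault(w, {})[c] = n from word_cat's items
  let df := st.2.items.foldl (fun d q =>
      (d.setdefault q.1.1 PySem.Dict.empty).modify q.1.1 PySem.Dict.empty
        (fun m => m.insert q.1.2 q.2)) PySem.Dict.empty
  (tf.items.map (fun q => (q.1, q.2.items)), df.items.map (fun q => (q.1, q.2.items)))

-- ===== PRECONDITION & SPEC =====
-- Pre_ excludes exactly the inputs where A raises IndexError: Y_c[i] with len(Y_c) < len(X_t).
def Pre_get_df_icf_matrix (X_t : List String) (Y_c : List String) : Prop :=
  X_t.length ≤ Y_c.length
instance (X_t : List String) (Y_c : List String) : Decidable (Pre_get_df_icf_matrix X_t Y_c) := by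
  unfold Pre_get_df_icf_matrix; infer_instance

def pvWitness_get_df_icf_matrix : List String × List String :=
  (["a b a", "b c"], ["x", "y"])

def Spec_get_df_icf_matrix (X_t : List String) (Y_c : List String)
    (out : (List (Int × List (String × Int))) × (List (String × List (String × Int)))) : Prop :=
  out = get_df_icf_matrix_alt X_t Y_c
instance (X_t : List String) (Y_c : List String)
    (out : (List (Int × List (String × Int))) × (List (String × List (String × Int)))) :
    Decidable (Spec_get_df_icf_matrix X_t Y_c out) := by
  unfold Spec_get_df_icf_matrix; infer_instance

-- ===== CLAIM (what is proved, stated in full; the proofs are below) =====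
def Claim_equal_get_df_icf_matrix : Prop := ∀ (X_t : List String) (Y_c : List String), Dom_get_df_icf_matrix X_t Y_c → Pre_get_df_icf_matrix X_t Y_c → Spec_get_df_icf_matrix X_t Y_c (get_df_icf_matrix X_t Y_c)

-- ===== LEMMAS AND PROOFS =====

-- Python's d.modify is definitionally insert-of-getD; stated once so we can rewrite with it.
theorem pv_modify_eq {κ ν : Type} [BEq κ] (d : PySem.Dict κ ν) (k : κ) (d0 : ν) (f : ν → ν) :
    d.modify k d0 f = d.insert k (f (d.getD k d0)) := rfl

-- inserting the looked-up value back is a no-op (keys unique)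
theorem pv_insert_getD_self {κ ν : Type} [BEq κ] [LawfulBEq κ] (d : PySem.Dict κ ν) (k : κ)
    (d0 : ν) (hc : d.contains k = true) (hnd : d.keys.Nodup) :
    d.insert k (d.getD k d0) = d := by
  apply PySem.Dict.ext
  rw [PySem.Dict.items_insert_of_contains _ _ hc]
  apply (List.map_congr_left ?_).trans (List.map_id _)
  intro p hp
  by_cases hpk : p.1 = k
  · subst hpk
    have hv : d.getD p.1 d0 = p.2 :=
      PySem.Dict.getD_of_mem_items (d := d) (k := p.1) (v := p.2) hp hnd d0
    simp [hv]
  · simp [hpk]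

-- a key with a value is an item (keys unique)
theorem pv_mem_getD_items {κ ν : Type} [BEq κ] [LawfulBEq κ] (d : PySem.Dict κ ν) (k : κ)
    (d0 : ν) (hnd : d.keys.Nodup) (hc : d.contains k = true) :
    (k, d.getD k d0) ∈ d.items := by
  have hk : k ∈ d.keys := (PySem.Dict.contains_iff_mem_keys _ _).mp hc
  simp only [PySem.Dict.keys] at hk
  rcases List.mem_map.mp hk with ⟨p, hp, hfst⟩
  obtain ⟨a, b⟩ := p
  dsimp at hfst; subst hfst
  have hv : d.getD a d0 = b :=
    PySem.Dict.getD_of_mem_items (d := d) (k := a) (v := b) hp hnd d0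
  rw [hv]; exact hp

-- A's per-token doc_dict step equals the insert-of-getD step
theorem pv_tf_step_eq (d : PySem.Dict String Int) (w : String) :
    (if d.contains w then d.modify w 0 (· + 1) else d.insert w 1)
      = d.insert w (d.getD w 0 + 1) := by
  cases h : d.contains w with
  | true => rw [if_pos rfl]; rfl
  | false =>
    rw [if_neg (by simp), PySem.Dict.getD_of_not_contains d _ h]
    norm_num

theorem pv_freq_eq (ws : List String) (d : PySem.Dict String Int) :
    ws.foldl (fun d w => if d.contains w then d.modify w 0 (· + 1) else d.insert w 1) d
      = ws.foldl (fun d w => d.insert w (d.getD w 0 + 1)) d := by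
  have hstep : (fun (d : PySem.Dict String Int) w =>
      if d.contains w then d.modify w 0 (· + 1) else d.insert w 1)
      = (fun (d : PySem.Dict String Int) w => d.insert w (d.getD w 0 + 1)) := by
    funext d w; exact pv_tf_step_eq d w
  rw [hstep]

-- per-document token counter
def pvC (s : String) : PySem.Dict String Int := PySem.Dict.counter (PySem.Str.split₀ s)

-- the corpus as a flat stream of (word, category) pairs
def pvP (X_t Y_c : List String) : List (String × String) :=
  (PySem.List.enumerate X_t).flatMap
    (fun p => (PySem.Str.split₀ p.2).map (fun w => (w, (PySem.List.pyGet? Y_c p.1).getD "")))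

-- df[w][c] += n, creating df[w] and df[w][c] as needed
def pvAddN (df : PySem.Dict String (PySem.Dict String Int)) (c w : String) (n : Int) :
    PySem.Dict String (PySem.Dict String Int) :=
  (df.setdefault w PySem.Dict.empty).modify w PySem.Dict.empty
    (fun m => m.insert c (m.getD c 0 + n))

-- the same, consuming an item of the flat (word,category) counter
def pvAddNP (d : PySem.Dict String (PySem.Dict String Int))
    (q : (String × String) × Int) : PySem.Dict String (PySem.Dict String Int) :=
  pvAddN d q.1.2 q.1.1 q.2

-- B's df step: df.setdefault(w, {})[c] = n
def pvAssign (d : PySem.Dict String (PySem.Dict String Int))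
    (q : (String × String) × Int) : PySem.Dict String (PySem.Dict String Int) :=
  (d.setdefault q.1.1 PySem.Dict.empty).modify q.1.1 PySem.Dict.empty
    (fun m => m.insert q.1.2 q.2)

-- A's per-token df step equals pvAddN · c w 1
theorem pv_df_step_eq (df : PySem.Dict String (PySem.Dict String Int)) (c w : String) :
    (let df1 := if df.contains w then df else df.insert w PySem.Dict.empty
     if (df1.getD w PySem.Dict.empty).contains c then
       df1.modify w PySem.Dict.empty (fun m => m.modify c 0 (· + 1))
     else
       df1.modify w PySem.Dict.empty (fun m => m.insert c 1))
      = pvAddN df c w 1 := by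
  unfold pvAddN
  cases hw : df.contains w with
  | true =>
    rw [PySem.Dict.setdefault_of_contains _ _ hw]
    show (if (df.getD w PySem.Dict.empty).contains c then
        df.modify w PySem.Dict.empty (fun m => m.modify c 0 (· + 1))
      else df.modify w PySem.Dict.empty (fun m => m.insert c 1)) = _
    cases hc : (df.getD w PySem.Dict.empty).contains c with
    | true => rw [if_pos rfl]; rfl
    | false =>
      rw [if_neg (by simp), pv_modify_eq, pv_modify_eq,
        PySem.Dict.getD_of_not_contains _ _ hc]
      norm_num
  | false =>
    rw [PySem.Dict.setdefault_of_not_contains _ _ hw]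
    show (if ((df.insert w PySem.Dict.empty).getD w PySem.Dict.empty).contains c then
        (df.insert w PySem.Dict.empty).modify w PySem.Dict.empty
          (fun m => m.modify c 0 (· + 1))
      else (df.insert w PySem.Dict.empty).modify w PySem.Dict.empty
          (fun m => m.insert c 1)) = _
    rw [PySem.Dict.getD_insert_self]
    rw [if_neg (by simp [PySem.Dict.contains_empty])]
    rw [pv_modify_eq, pv_modify_eq, PySem.Dict.getD_insert_self]
    rw [PySem.Dict.getD_of_not_contains _ _ (PySem.Dict.contains_empty c)]
    norm_num

-- the inner dict at any OTHER word is untouched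
theorem pv_addN_getD_ne (D : PySem.Dict String (PySem.Dict String Int)) (c w w' : String)
    (n : Int) (hne : w' ≠ w) :
    (pvAddN D c w n).getD w' PySem.Dict.empty = D.getD w' PySem.Dict.empty := by
  simp only [pvAddN, pv_modify_eq]
  rw [PySem.Dict.getD_insert_of_ne _ _ _ hne]
  cases hw : D.contains w with
  | true => rw [PySem.Dict.setdefault_of_contains _ _ hw]
  | false =>
    rw [PySem.Dict.setdefault_of_not_contains _ _ hw,
      PySem.Dict.getD_insert_of_ne _ _ _ hne]

-- the inner dict at w after pvAddN at w
theorem pv_addN_getD_self (D : PySem.Dict String (PySem.Dict String Int)) (c w : String)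
    (n : Int) :
    (pvAddN D c w n).getD w PySem.Dict.empty
      = (D.getD w PySem.Dict.empty).insert c ((D.getD w PySem.Dict.empty).getD c 0 + n) := by
  simp only [pvAddN, pv_modify_eq]
  rw [PySem.Dict.getD_insert_self]
  cases hw : D.contains w with
  | true => rw [PySem.Dict.setdefault_of_contains _ _ hw]
  | false =>
    rw [PySem.Dict.setdefault_of_not_contains _ _ hw, PySem.Dict.getD_insert_self,
      PySem.Dict.getD_of_not_contains _ _ hw]

-- the pair (w,c) is present after its own pvAddN
theorem pv_addN_self_present (D : PySem.Dict String (PySem.Dict String Int)) (c w : String)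
    (n : Int) : ((pvAddN D c w n).getD w PySem.Dict.empty).contains c = true := by
  rw [pv_addN_getD_self]
  exact PySem.Dict.contains_insert_self _ _ _

-- pair presence is preserved by any pvAddN
theorem pv_addN_pres (D : PySem.Dict String (PySem.Dict String Int)) (c w c' w' : String)
    (n : Int) (h : (D.getD w PySem.Dict.empty).contains c = true) :
    ((pvAddN D c' w' n).getD w PySem.Dict.empty).contains c = true := by
  by_cases hww : w = w'
  · subst hww
    rw [pv_addN_getD_self, PySem.Dict.contains_insert]
    simp [h]
  · rw [pv_addN_getD_ne _ _ _ _ _ hww]; exact h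

-- pair ABSENCE is preserved by pvAddN at a different pair
theorem pv_addN_abs_pres (D : PySem.Dict String (PySem.Dict String Int)) (c w c' w' : String)
    (n : Int) (hne : (w, c) ≠ (w', c'))
    (h : (D.getD w PySem.Dict.empty).contains c = false) :
    ((pvAddN D c' w' n).getD w PySem.Dict.empty).contains c = false := by
  by_cases hww : w = w'
  · subst hww
    have hcc : c ≠ c' := fun hc => hne (by rw [hc])
    rw [pv_addN_getD_self, PySem.Dict.contains_insert]
    simp [h, hcc]
  · rw [pv_addN_getD_ne _ _ _ _ _ hww]; exact h

-- inner-word presence forces outer presence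
theorem pv_contains_of_inner (D : PySem.Dict String (PySem.Dict String Int)) (c w : String)
    (h : (D.getD w PySem.Dict.empty).contains c = true) : D.contains w = true := by
  cases hw : D.contains w with
  | true => rfl
  | false =>
    rw [PySem.Dict.getD_of_not_contains _ _ hw] at h
    rw [PySem.Dict.contains_empty] at h
    exact absurd h (by simp)

-- pvAddN twice at the same word and category merges the two amounts
theorem pv_addN_addN (df : PySem.Dict String (PySem.Dict String Int)) (c w : String) (m n : Int) :
    pvAddN (pvAddN df c w m) c w n = pvAddN df c w (m + n) := by
  simp only [pvAddN, pv_modify_eq]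
  rw [PySem.Dict.setdefault_of_contains _ _ (PySem.Dict.contains_insert_self _ _ _)]
  rw [PySem.Dict.getD_insert_self, PySem.Dict.insert_insert_self,
    PySem.Dict.getD_insert_self, PySem.Dict.insert_insert_self, Int.add_assoc]

-- two inserts at distinct keys commute when the first key is already present
theorem pv_inner_comm (m : PySem.Dict String Int) (c c' : String) (hne : c' ≠ c)
    (hc : m.contains c = true) (a b : Int) :
    (m.insert c a).insert c' b = (m.insert c' b).insert c a := by
  apply PySem.Dict.ext
  by_cases hc' : m.contains c' = true
  · have h1 : (m.insert c a).contains c' = true := by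
      rw [PySem.Dict.contains_insert]; simp [hc']
    have h2 : (m.insert c' b).contains c = true := by
      rw [PySem.Dict.contains_insert]; simp [hc]
    rw [PySem.Dict.items_insert_of_contains _ _ h1,
      PySem.Dict.items_insert_of_contains _ _ hc,
      PySem.Dict.items_insert_of_contains _ _ h2,
      PySem.Dict.items_insert_of_contains _ _ hc']
    simp only [List.map_map]
    apply List.map_congr_left
    intro p _
    by_cases hpc : p.1 = c
    · have : ¬ (p.1 = c') := by rw [hpc]; exact fun h => hne h.symm
      simp [Function.comp, hpc, Ne.symm hne]
    · by_cases hpc' : p.1 = c'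
      · simp [Function.comp, hpc', hne]
      · simp [Function.comp, hpc, hpc']
  · have hcf : m.contains c' = false := by simpa using hc'
    have h1 : (m.insert c a).contains c' = false := by
      rw [PySem.Dict.contains_insert]; simp [hcf, hne]
    have h2 : (m.insert c' b).contains c = true := by
      rw [PySem.Dict.contains_insert]; simp [hc]
    rw [PySem.Dict.items_insert_of_not_contains _ _ h1,
      PySem.Dict.items_insert_of_contains _ _ hc,
      PySem.Dict.items_insert_of_contains _ _ h2,
      PySem.Dict.items_insert_of_not_contains _ _ hcf]
    rw [List.map_append]
    simp [hne]

-- pvAddN at an already-present word commutes with pvAddN (any category) at a different word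
theorem pv_addN_comm (E : PySem.Dict String (PySem.Dict String Int)) (c c' w x : String)
    (hxw : x ≠ w) (hw : E.contains w = true) (n k : Int) :
    pvAddN (pvAddN E c w k) c' x n = pvAddN (pvAddN E c' x n) c w k := by
  simp only [pvAddN, pv_modify_eq]
  rw [PySem.Dict.setdefault_of_contains _ _ hw]
  by_cases hx : E.contains x = true
  · have hcx : (E.insert w ((E.getD w PySem.Dict.empty).insert c
        ((E.getD w PySem.Dict.empty).getD c 0 + k))).contains x = true := by
      rw [PySem.Dict.contains_insert]; simp [hx]
    rw [PySem.Dict.setdefault_of_contains _ _ hcx,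
        PySem.Dict.setdefault_of_contains _ _ hx]
    have hcw : (E.insert x ((E.getD x PySem.Dict.empty).insert c'
        ((E.getD x PySem.Dict.empty).getD c' 0 + n))).contains w = true := by
      rw [PySem.Dict.contains_insert]; simp [hw]
    rw [PySem.Dict.setdefault_of_contains _ _ hcw]
    rw [PySem.Dict.getD_insert_of_ne _ _ _ hxw,
        PySem.Dict.getD_insert_of_ne _ _ _ (Ne.symm hxw)]
    apply PySem.Dict.ext
    rw [PySem.Dict.items_insert_of_contains _ _ hcx,
        PySem.Dict.items_insert_of_contains _ _ hw,
        PySem.Dict.items_insert_of_contains _ _ hcw,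
        PySem.Dict.items_insert_of_contains _ _ hx]
    simp only [List.map_map]
    apply List.map_congr_left
    intro p _
    by_cases hpw : p.1 = w
    · have hpx : ¬ (p.1 = x) := by rw [hpw]; exact fun h => hxw h.symm
      simp [Function.comp, hpw, Ne.symm hxw]
    · by_cases hpx : p.1 = x
      · simp [Function.comp, hpx, hxw]
      · simp [Function.comp, hpw, hpx]
  · have hxf : E.contains x = false := by simpa using hx
    have hnewL : (E.insert w ((E.getD w PySem.Dict.empty).insert c
        ((E.getD w PySem.Dict.empty).getD c 0 + k))).contains x = false := by
      rw [PySem.Dict.contains_insert]; simp [hxf, hxw]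
    rw [PySem.Dict.setdefault_of_not_contains _ _ hnewL,
        PySem.Dict.setdefault_of_not_contains _ _ hxf]
    rw [PySem.Dict.getD_insert_self, PySem.Dict.getD_insert_self,
        PySem.Dict.insert_insert_self, PySem.Dict.insert_insert_self]
    have hcw : (E.insert x (PySem.Dict.empty.insert c'
        (PySem.Dict.empty.getD c' 0 + n))).contains w = true := by
      rw [PySem.Dict.contains_insert]; simp [hw]
    rw [PySem.Dict.setdefault_of_contains _ _ hcw,
        PySem.Dict.getD_insert_of_ne _ _ _ (Ne.symm hxw)]
    apply PySem.Dict.ext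
    rw [PySem.Dict.items_insert_of_not_contains _ _ hnewL,
        PySem.Dict.items_insert_of_contains _ _ hw,
        PySem.Dict.items_insert_of_contains _ _ hcw,
        PySem.Dict.items_insert_of_not_contains _ _ hxf]
    rw [List.map_append]
    simp [hxw]

-- pvAddN at a present word is a single in-place insert of the updated inner dict
theorem pv_addN_insert_form (E : PySem.Dict String (PySem.Dict String Int)) (c w : String)
    (n : Int) (hw : E.contains w = true) :
    pvAddN E c w n = E.insert w ((E.getD w PySem.Dict.empty).insert c
      ((E.getD w PySem.Dict.empty).getD c 0 + n)) := by
  simp only [pvAddN, pv_modify_eq]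
  rw [PySem.Dict.setdefault_of_contains _ _ hw]

-- pvAddN at the same word, different categories, word present: inner inserts commute
theorem pv_addN_comm_same (E : PySem.Dict String (PySem.Dict String Int)) (c c' w : String)
    (hne : c' ≠ c) (hc : (E.getD w PySem.Dict.empty).contains c = true) (k n : Int) :
    pvAddN (pvAddN E c w k) c' w n = pvAddN (pvAddN E c' w n) c w k := by
  have hw : E.contains w = true := pv_contains_of_inner E c w hc
  rw [pv_addN_insert_form E c w k hw, pv_addN_insert_form E c' w n hw]
  rw [pv_addN_insert_form _ c' w n (PySem.Dict.contains_insert_self _ _ _),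
      pv_addN_insert_form _ c w k (PySem.Dict.contains_insert_self _ _ _)]
  rw [PySem.Dict.getD_insert_self, PySem.Dict.getD_insert_self,
      PySem.Dict.insert_insert_self, PySem.Dict.insert_insert_self]
  rw [PySem.Dict.getD_insert_of_ne _ _ _ hne, PySem.Dict.getD_insert_of_ne _ _ _ (Ne.symm hne)]
  exact congrArg _ (pv_inner_comm _ _ _ hne hc _ _)

-- a pvAddN at a fully present pair commutes with a pvAddN at any other pair
theorem pv_pair_comm (E : PySem.Dict String (PySem.Dict String Int)) (w c w' c' : String)
    (k n : Int) (hne : (w', c') ≠ (w, c))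
    (hc : (E.getD w PySem.Dict.empty).contains c = true) :
    pvAddN (pvAddN E c w k) c' w' n = pvAddN (pvAddN E c' w' n) c w k := by
  by_cases hww : w' = w
  · subst hww
    have hcc : c' ≠ c := fun h => hne (by rw [h])
    exact pv_addN_comm_same E c c' w' hcc hc k n
  · exact pv_addN_comm E c c' w w' hww (pv_contains_of_inner E c w hc) n k

-- a pending +1 at a fully present pair can be deferred past items with other pair keys
theorem pv_defer_pair (l : List ((String × String) × Int)) (w c : String)
    (E : PySem.Dict String (PySem.Dict String Int))
    (hl : ∀ q ∈ l, q.1 ≠ (w, c)) (hE : (E.getD w PySem.Dict.empty).contains c = true) :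
    l.foldl pvAddNP (pvAddN E c w 1) = pvAddN (l.foldl pvAddNP E) c w 1 := by
  induction l generalizing E with
  | nil => rfl
  | cons q l ih =>
    simp only [List.foldl_cons]
    have hq : (q.1.1, q.1.2) ≠ (w, c) := by
      have := hl q (List.mem_cons_self); simpa using this
    have : pvAddNP (pvAddN E c w 1) q = pvAddN (pvAddNP E q) c w 1 := by
      show pvAddN (pvAddN E c w 1) q.1.2 q.1.1 q.2 = _
      exact pv_pair_comm E w c q.1.1 q.1.2 1 q.2 hq hE
    rw [this]
    exact ih _ (fun r hr => hl r (List.mem_cons_of_mem _ hr))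
      (pv_addN_pres E c w q.1.2 q.1.1 q.2 hE)

-- counter keeps keys nodup (as the list of item fsts)
theorem pv_counter_nodup_fst {κ : Type} [BEq κ] [LawfulBEq κ] (xs : List κ) :
    ((PySem.Dict.counter xs).items.map Prod.fst).Nodup := by
  have h := PySem.Dict.nodup_keys_counter xs
  simpa [PySem.Dict.keys] using h

-- MAIN df lemma: token-by-token +1 over the pair stream = pair-counter items with counts
theorem pv_stream_eq (P : List (String × String))
    (df : PySem.Dict String (PySem.Dict String Int)) :
    P.foldl (fun d p => pvAddN d p.2 p.1 1) df
      = (PySem.Dict.counter P).items.foldl pvAddNP df := by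
  induction P using List.reverseRecOn generalizing df with
  | nil => rfl
  | append_singleton P p ih =>
    rw [List.foldl_append, List.foldl_cons, List.foldl_nil, ih]
    have hcnt : PySem.Dict.counter (P ++ [p])
        = (PySem.Dict.counter P).insert p (((PySem.Dict.counter P).getD p 0) + 1) := by
      rw [PySem.Dict.counter_append_singleton]; rfl
    by_cases hp : p ∈ P
    · have hcontains : (PySem.Dict.counter P).contains p = true := by
        rw [PySem.Dict.contains_counter]; exact List.contains_iff_mem.mpr hp
      rw [hcnt, PySem.Dict.items_insert_of_contains _ _ hcontains]
      have hmem : (p, (PySem.Dict.counter P).getD p 0) ∈ (PySem.Dict.counter P).items :=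
        pv_mem_getD_items _ _ _ (PySem.Dict.nodup_keys_counter P) hcontains
      rcases List.append_of_mem hmem with ⟨l1, l2, hsplit⟩
      have hnd := pv_counter_nodup_fst P
      rw [hsplit, List.map_append, List.map_cons] at hnd
      have hdisj := List.disjoint_of_nodup_append hnd
      have hpl2 : p ∉ l2.map Prod.fst := by
        have := (List.Nodup.of_append_right hnd)
        exact (List.nodup_cons.mp this).1
      have hl1 : ∀ q ∈ l1, q.1 ≠ p := by
        intro q hq heq
        exact hdisj (List.mem_map.mpr ⟨q, hq, heq⟩) (List.mem_cons_self)
      have hl2 : ∀ q ∈ l2, q.1 ≠ p := by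
        intro q hq heq
        exact hpl2 (heq ▸ List.mem_map.mpr ⟨q, hq, rfl⟩)
      rw [hsplit]
      rw [List.map_append, List.map_cons]
      have hfix1 : List.map (fun q => if (q.1 == p) = true
            then (p, ((PySem.Dict.counter P).getD p 0) + 1) else q) l1 = l1 := by
        apply (List.map_congr_left ?_).trans (List.map_id _)
        intro q hq; simp [hl1 q hq]
      have hfix2 : List.map (fun q => if (q.1 == p) = true
            then (p, ((PySem.Dict.counter P).getD p 0) + 1) else q) l2 = l2 := by
        apply (List.map_congr_left ?_).trans (List.map_id _)
        intro q hq; simp [hl2 q hq]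
      rw [hfix1, hfix2]
      simp only [beq_self_eq_true, if_true, List.foldl_append, List.foldl_cons]
      have hsplit' : pvAddNP (l1.foldl pvAddNP df) (p, (PySem.Dict.counter P).getD p 0 + 1)
          = pvAddN (pvAddN (l1.foldl pvAddNP df) p.2 p.1 ((PySem.Dict.counter P).getD p 0))
              p.2 p.1 1 := by
        show pvAddN _ p.2 p.1 _ = pvAddN (pvAddN _ p.2 p.1 _) p.2 p.1 1
        rw [pv_addN_addN]
      rw [hsplit']
      rw [pv_defer_pair l2 p.1 p.2 _ (fun q hq => by simpa using hl2 q hq)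
        (pv_addN_self_present _ _ _ _)]
      rfl
    · have hcontains : (PySem.Dict.counter P).contains p = false := by
        rw [PySem.Dict.contains_counter]; simp [hp]
      have hg0 : (PySem.Dict.counter P).getD p 0 = 0 :=
        PySem.Dict.getD_of_not_contains _ _ hcontains
      rw [hcnt, hg0, PySem.Dict.items_insert_of_not_contains _ _ hcontains]
      rw [List.foldl_append, List.foldl_cons, List.foldl_nil]
      show pvAddN _ p.2 p.1 1 = pvAddN _ p.2 p.1 (0 + 1)
      norm_num

-- B's assignment step equals pvAddNP while the assigned pair is still absent
theorem pv_assign_eq_addNP (D : PySem.Dict String (PySem.Dict String Int))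
    (q : (String × String) × Int)
    (h : (D.getD q.1.1 PySem.Dict.empty).contains q.1.2 = false) :
    pvAssign D q = pvAddNP D q := by
  unfold pvAssign pvAddNP pvAddN
  rw [pv_modify_eq, pv_modify_eq, PySem.Dict.getD_setdefault_self]
  rw [PySem.Dict.getD_of_not_contains _ _ h]
  norm_num

-- folding B's assignments over a list of distinct, initially absent pairs is folding pvAddNP
theorem pv_assign_fold (l : List ((String × String) × Int))
    (D : PySem.Dict String (PySem.Dict String Int))
    (hnd : (l.map (·.1)).Nodup)
    (h : ∀ q ∈ l, (D.getD q.1.1 PySem.Dict.empty).contains q.1.2 = false) :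
    l.foldl pvAssign D = l.foldl pvAddNP D := by
  induction l generalizing D with
  | nil => rfl
  | cons q l ih =>
    simp only [List.foldl_cons]
    rw [pv_assign_eq_addNP D q (h q (List.mem_cons_self))]
    have hq : q.1 ∉ l.map (·.1) := (List.nodup_cons.mp hnd).1
    refine ih _ (List.nodup_cons.mp hnd).2 ?_
    intro r hr
    have hrne : r.1 ≠ q.1 := fun heq => hq (heq ▸ List.mem_map.mpr ⟨r, hr, rfl⟩)
    exact pv_addN_abs_pres D r.1.2 r.1.1 q.1.2 q.1.1 q.2 hrne (h r (List.mem_cons_of_mem _ hr))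

-- ===== tf side =====

-- tag a per-document counter item with its document index
def pvTag (i : Int) (r : String × Int) : (Int × String) × Int := ((i, r.1), r.2)

-- counting (i, w) pairs on top of items that never mention i appends i's tagged counter
theorem pv_tag_fold (ws : List String) (i : Int) :
    ∀ (c : PySem.Dict String Int) (D : PySem.Dict (Int × String) Int)
      (A_ : List ((Int × String) × Int)),
    D.items = A_ ++ c.items.map (pvTag i) →
    (∀ q ∈ A_, q.1.1 ≠ i) → (A_.map (·.1)).Nodup → c.keys.Nodup →
    (ws.foldl (fun d w => d.insert (i, w) (d.getD (i, w) 0 + 1)) D).items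
      = A_ ++ ((ws.foldl (fun c w => c.insert w (c.getD w 0 + 1)) c).items.map (pvTag i)) := by
  induction ws with
  | nil => intro c D A_ h _ _ _; exact h
  | cons w ws ih =>
    intro c D A_ hitems hA hAnd hcnd
    simp only [List.foldl_cons]
    have hDkeys : D.keys = A_.map (·.1) ++ c.items.map (fun r => (i, r.1)) := by
      simp only [PySem.Dict.keys, hitems, List.map_append, List.map_map]
      rfl
    have htagnd : (c.items.map (fun r => ((i, r.1) : Int × String))).Nodup := by
      have h1 : (c.items.map Prod.fst).Nodup := by
        have := hcnd; simpa [PySem.Dict.keys] using this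
      have : c.items.map (fun r => ((i, r.1) : Int × String))
          = (c.items.map Prod.fst).map (fun w => (i, w)) := by
        rw [List.map_map]
        exact List.map_congr_left (fun r _ => rfl)
      rw [this]
      exact h1.map (fun a b h => by simpa using h)
    have hDnd : D.keys.Nodup := by
      rw [hDkeys]
      refine List.Nodup.append hAnd htagnd ?_
      intro k hk1 hk2
      rcases List.mem_map.mp hk1 with ⟨q, hq, hk⟩
      rcases List.mem_map.mp hk2 with ⟨r, _, hk'⟩
      exact hA q hq (by rw [hk, ← hk'])
    have hcont : D.contains (i, w) = c.contains w := by
      rw [PySem.Dict.contains_eq_decide_mem_keys, PySem.Dict.contains_eq_decide_mem_keys]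
      rw [hDkeys]
      congr 1
      simp only [eq_iff_iff, List.mem_append, List.mem_map]
      constructor
      · rintro (⟨q, hq, hk⟩ | ⟨r, hr, hk⟩)
        · exact absurd (congrArg Prod.fst hk) (hA q hq)
        · have hrw : r.1 = w := by
            have := congrArg Prod.snd hk; simpa using this
          simp only [PySem.Dict.keys]
          exact List.mem_map.mpr ⟨r, hr, hrw⟩
      · intro hw
        right
        simp only [PySem.Dict.keys] at hw
        rcases List.mem_map.mp hw with ⟨r, hr, hk⟩
        exact ⟨r, hr, by rw [hk]⟩
    have hval : D.getD (i, w) 0 = c.getD w 0 := by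
      cases hcw : c.contains w with
      | true =>
        have hmemc : (w, c.getD w 0) ∈ c.items := pv_mem_getD_items _ _ _ hcnd hcw
        have hmemD : ((i, w), c.getD w 0) ∈ D.items := by
          rw [hitems]
          exact List.mem_append_right _ (List.mem_map.mpr ⟨_, hmemc, rfl⟩)
        exact PySem.Dict.getD_of_mem_items (d := D) hmemD hDnd 0
      | false =>
        rw [PySem.Dict.getD_of_not_contains _ _ (by rw [hcont]; exact hcw),
          PySem.Dict.getD_of_not_contains _ _ hcw]
    rw [hval]
    cases hcw : c.contains w with
    | true =>
      have hDc : D.contains (i, w) = true := by rw [hcont]; exact hcw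
      apply ih (c.insert w (c.getD w 0 + 1)) _ A_ ?_ hA hAnd (PySem.Dict.nodup_keys_insert _ _ _ hcnd)
      -- items relation after the step
      rw [PySem.Dict.items_insert_of_contains _ _ hDc, hitems, List.map_append]
      rw [PySem.Dict.items_insert_of_contains _ _ hcw]
      congr 1
      · apply (List.map_congr_left ?_).trans (List.map_id _)
        intro q hq
        have : ¬ (q.1 = (i, w)) := fun h => hA q hq (by rw [h])
        simp [this]
      · rw [List.map_map, List.map_map]
        apply List.map_congr_left
        intro r _
        by_cases hrw : r.1 = w
        · simp [pvTag, Function.comp, hrw]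
        · simp [pvTag, Function.comp, hrw]
    | false =>
      have hDc : D.contains (i, w) = false := by rw [hcont]; exact hcw
      apply ih (c.insert w (c.getD w 0 + 1)) _ A_ ?_ hA hAnd (PySem.Dict.nodup_keys_insert _ _ _ hcnd)
      rw [PySem.Dict.items_insert_of_not_contains _ _ hDc, hitems,
        PySem.Dict.items_insert_of_not_contains _ _ hcw]
      rw [List.map_append, List.append_assoc]
      rfl

-- the flat (doc,word) counter's items: per-document tagged counters, in document order
theorem pv_dw_items (docs : List String) :
    ∀ (s : Int) (D : PySem.Dict (Int × String) Int),
    (∀ q ∈ D.items, q.1.1 < s) → (D.items.map (·.1)).Nodup →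
    ((PySem.List.enumerate docs s).foldl (fun d p =>
        (PySem.Str.split₀ p.2).foldl
          (fun d w => d.insert (p.1, w) (d.getD (p.1, w) 0 + 1)) d) D).items
      = D.items ++ (PySem.List.enumerate docs s).flatMap
          (fun p => (pvC p.2).items.map (pvTag p.1)) := by
  induction docs with
  | nil =>
    intro s D _ _
    simp [PySem.List.enumerate_nil]
  | cons x docs ih =>
    intro s D hlt hnd
    rw [PySem.List.enumerate_cons]
    simp only [List.foldl_cons, List.flatMap_cons]
    have hA : ∀ q ∈ D.items, q.1.1 ≠ s := fun q hq h => by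
      have := hlt q hq; omega
    have hstep := pv_tag_fold (PySem.Str.split₀ x) s PySem.Dict.empty D D.items
      (by rw [show (PySem.Dict.empty : PySem.Dict String Int).items = [] from rfl]; simp)
      hA hnd (PySem.Dict.nodup_keys_empty)
    have hcounter : (PySem.Str.split₀ x).foldl
        (fun c w => c.insert w (c.getD w 0 + 1)) PySem.Dict.empty = pvC x :=
      PySem.Dict.foldl_insert_getD_add_one_eq_counter _
    rw [hcounter] at hstep
    set D' := (PySem.Str.split₀ x).foldl
      (fun d w => d.insert ((s : Int), w) (d.getD (s, w) 0 + 1)) D with hD'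
    have hlt' : ∀ q ∈ D'.items, q.1.1 < s + 1 := by
      intro q hq
      rw [hstep] at hq
      rcases List.mem_append.mp hq with h | h
      · have := hlt q h; omega
      · rcases List.mem_map.mp h with ⟨r, _, hr⟩
        rw [← hr]; simp [pvTag]
    have hnd' : (D'.items.map (·.1)).Nodup := by
      rw [hstep, List.map_append]
      refine List.Nodup.append hnd ?_ ?_
      · rw [List.map_map]
        have h1 : ((pvC x).items.map Prod.fst).Nodup := pv_counter_nodup_fst _
        have : (pvC x).items.map (Prod.fst ∘ pvTag s)
            = ((pvC x).items.map Prod.fst).map (fun w => ((s : Int), w)) := by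
          rw [List.map_map]
          exact List.map_congr_left (fun r _ => rfl)
        rw [this]
        exact h1.map (fun a b h => by simpa using h)
      · intro k hk1 hk2
        rcases List.mem_map.mp hk1 with ⟨q, hq, hk⟩
        rcases List.mem_map.mp hk2 with ⟨r, hrmem, hk'⟩
        rcases List.mem_map.mp hrmem with ⟨r0, _, hr0⟩
        have h1 : k.1 < s := hk ▸ hlt q hq
        have h2 : k.1 = s := by rw [← hk', ← hr0]; rfl
        omega
    rw [ih (s + 1) D' hlt' hnd', hstep, List.append_assoc]

-- filling one document's words into tf[i] (i present): one in-place insert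
theorem pv_fill_one (l : List (String × Int)) :
    ∀ (t : PySem.Dict Int (PySem.Dict String Int)) (i : Int),
    t.contains i = true → t.keys.Nodup →
    l.foldl (fun t r => t.modify i PySem.Dict.empty (fun m => m.insert r.1 r.2)) t
      = t.insert i (l.foldl (fun m r => m.insert r.1 r.2) (t.getD i PySem.Dict.empty)) := by
  induction l with
  | nil =>
    intro t i hc hnd
    simp only [List.foldl_nil]
    exact (pv_insert_getD_self t i _ hc hnd).symm
  | cons r l ih =>
    intro t i hc hnd
    simp only [List.foldl_cons]
    rw [pv_modify_eq]
    rw [ih _ i (PySem.Dict.contains_insert_self _ _ _) (PySem.Dict.nodup_keys_insert _ _ _ hnd)]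
    rw [PySem.Dict.getD_insert_self, PySem.Dict.insert_insert_self]

-- re-inserting a dict's items into the empty dict rebuilds the dict
theorem pv_rebuild (d : PySem.Dict String Int) (hnd : d.keys.Nodup) :
    d.items.foldl (fun m r => m.insert r.1 r.2) PySem.Dict.empty = d := by
  apply PySem.Dict.ext
  rw [PySem.Dict.items_foldl_insert_fresh d.items (fun r => r.1) (fun r => r.2)
    PySem.Dict.empty (fun a _ => PySem.Dict.contains_empty _)
    (by simpa [PySem.Dict.keys] using hnd)]
  rw [show (PySem.Dict.empty : PySem.Dict String Int).items = [] from rfl]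
  simp

-- filling all tagged counter items groups them back per document
theorem pv_fill_all (docs : List String) :
    ∀ (s : Int) (t : PySem.Dict Int (PySem.Dict String Int)),
    (∀ p ∈ PySem.List.enumerate docs s,
      t.contains p.1 = true ∧ t.getD p.1 PySem.Dict.empty = PySem.Dict.empty) →
    t.keys.Nodup →
    ((PySem.List.enumerate docs s).flatMap
        (fun p => (pvC p.2).items.map (pvTag p.1))).foldl
      (fun t q => t.modify q.1.1 PySem.Dict.empty (fun m => m.insert q.1.2 q.2)) t
      = (PySem.List.enumerate docs s).foldl (fun t p => t.insert p.1 (pvC p.2)) t := by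
  induction docs with
  | nil => intro s t _ _; simp [PySem.List.enumerate_nil]
  | cons x docs ih =>
    intro s t hp hnd
    rw [PySem.List.enumerate_cons]
    simp only [List.flatMap_cons, List.foldl_append, List.foldl_cons]
    have hhead := hp (s, x) (by rw [PySem.List.enumerate_cons]; exact List.mem_cons_self)
    have hblock : ((pvC x).items.map (pvTag s)).foldl
        (fun t q => t.modify q.1.1 PySem.Dict.empty (fun m => m.insert q.1.2 q.2)) t
        = t.insert s (pvC x) := by
      rw [List.foldl_map]
      have : (fun (t : PySem.Dict Int (PySem.Dict String Int)) (r : String × Int) =>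
          t.modify (pvTag s r).1.1 PySem.Dict.empty (fun m => m.insert (pvTag s r).1.2 (pvTag s r).2))
          = (fun t r => t.modify s PySem.Dict.empty (fun m => m.insert r.1 r.2)) := rfl
      have hCnd : (pvC x).keys.Nodup := PySem.Dict.nodup_keys_counter _
      rw [this, pv_fill_one _ t s hhead.1 hnd, hhead.2, pv_rebuild _ hCnd]
    rw [hblock]
    apply ih (s + 1)
    · intro p hpmem
      have hps : p.1 ≠ s := by
        rcases (PySem.List.mem_enumerate_iff _ _ _).mp hpmem with ⟨k, hk, hpk⟩
        rw [hpk]; simp; omega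
      constructor
      · rw [PySem.Dict.contains_insert]
        have := (hp p (by rw [PySem.List.enumerate_cons]; exact List.mem_cons_of_mem _ hpmem)).1
        simp [this]
      · rw [PySem.Dict.getD_insert_of_ne _ _ _ hps]
        exact (hp p (by rw [PySem.List.enumerate_cons]; exact List.mem_cons_of_mem _ hpmem)).2
    · exact PySem.Dict.nodup_keys_insert _ _ _ hnd
  
-- inserting values for all keys, in key order, replaces the values in place
theorem pv_replace_seq (l : List (Int × String)) (v : Int × String → PySem.Dict String Int) :
    ∀ (t : PySem.Dict Int (PySem.Dict String Int))
      (pre : List (Int × PySem.Dict String Int)),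
    t.items = pre ++ l.map (fun p => (p.1, PySem.Dict.empty)) →
    (∀ r ∈ pre, r.1 ∉ l.map (·.1)) → (l.map (·.1)).Nodup →
    (l.foldl (fun t p => t.insert p.1 (v p)) t).items = pre ++ l.map (fun p => (p.1, v p)) := by
  induction l with
  | nil => intro t pre h _ _; simpa using h
  | cons p l ih =>
    intro t pre hitems hpre hnd
    simp only [List.foldl_cons]
    have hc : t.contains p.1 = true := by
      rw [PySem.Dict.contains_iff_mem_keys]
      simp only [PySem.Dict.keys, hitems, List.map_append, List.map_cons, List.map_map]
      exact List.mem_append_right _ (List.mem_cons_self)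
    have hstep : (t.insert p.1 (v p)).items
        = (pre ++ [(p.1, v p)]) ++ l.map (fun p => (p.1, PySem.Dict.empty)) := by
      rw [PySem.Dict.items_insert_of_contains _ _ hc, hitems, List.map_cons,
        List.map_append, List.map_cons]
      have h1 : pre.map (fun r => if (r.1 == p.1) = true then (p.1, v p) else r) = pre := by
        apply (List.map_congr_left ?_).trans (List.map_id _)
        intro r hr
        have : ¬ (r.1 = p.1) := fun h =>
          hpre r hr (h ▸ List.mem_cons_self)
        simp [this]
      have h2 : (l.map (fun q => ((q.1, PySem.Dict.empty) : Int × PySem.Dict String Int))).map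
          (fun r => if (r.1 == p.1) = true then (p.1, v p) else r)
          = l.map (fun q => (q.1, PySem.Dict.empty)) := by
        rw [List.map_map]
        apply List.map_congr_left
        intro q hq
        have hqp : ¬ (q.1 = p.1) := by
          intro h
          have hm : q.1 ∈ l.map (fun x => x.1) := List.mem_map.mpr ⟨q, hq, rfl⟩
          rw [h] at hm
          exact (List.nodup_cons.mp hnd).1 hm
        simp [Function.comp, hqp]
      rw [h1, h2]
      simp
    rw [ih _ _ hstep ?_ (List.nodup_cons.mp hnd).2]
    · simp
    · intro r hr
      rcases List.mem_append.mp hr with h | h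
      · intro hmem
        exact hpre r h (List.mem_cons_of_mem _ hmem)
      · intro hmem
        have hr1 : r.1 = p.1 := by
          rcases List.mem_singleton.mp h with rfl; rfl
        rw [hr1] at hmem
        exact (List.nodup_cons.mp hnd).1 hmem

-- the fsts of enumerate are nodup
theorem pv_enum_nodup (xs : List String) (s : Int) :
    ((PySem.List.enumerate xs s).map Prod.fst).Nodup := by
  have h := PySem.List.pairwise_lt_enumerate xs s
  have h2 : ((PySem.List.enumerate xs s).map Prod.fst).Pairwise (· < ·) :=
    List.pairwise_map.mpr h
  simpa [List.Nodup] using h2.imp (fun hab => Int.ne_of_lt hab)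

-- ===== assembly =====

-- folding over a flatMap is the nested fold
theorem pv_foldl_flatMap {α β γ : Type} (l : List α) (g : α → List β) (f : γ → β → γ)
    (init : γ) :
    (l.flatMap g).foldl f init = l.foldl (fun a x => (g x).foldl f a) init := by
  induction l generalizing init with
  | nil => rfl
  | cons x l ih => simp only [List.flatMap_cons, List.foldl_append, List.foldl_cons, ih]

-- A's tf builder inserts each document's token counter
theorem pv_tfA_step :
    (fun (tf : PySem.Dict Int (PySem.Dict String Int)) (p : Int × String) =>
      tf.insert p.1 ((PySem.Str.split₀ p.2).foldl
        (fun d w => if d.contains w then d.modify w 0 (· + 1) else d.insert w 1)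
        PySem.Dict.empty))
      = (fun (tf : PySem.Dict Int (PySem.Dict String Int)) (p : Int × String) =>
          tf.insert p.1 (pvC p.2)) := by
  funext tf p
  rw [pv_freq_eq]
  exact congrArg _ (PySem.Dict.foldl_insert_getD_add_one_eq_counter _)

-- the canonical items of the tf table
theorem pv_tf_canonical (X_t : List String) :
    ((PySem.List.enumerate X_t).foldl
        (fun tf p => tf.insert p.1 (pvC p.2))
        (PySem.Dict.empty : PySem.Dict Int (PySem.Dict String Int))).items
      = (PySem.List.enumerate X_t).map (fun p => (p.1, pvC p.2)) := by
  rw [PySem.Dict.items_foldl_insert_fresh (PySem.List.enumerate X_t) Prod.fst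
      (fun p => pvC p.2) PySem.Dict.empty
      (fun a _ => PySem.Dict.contains_empty _) (pv_enum_nodup X_t 0)]
  rfl

-- A's df equals the fold of pvAddN over the flat pair stream
theorem pv_dfA_eq (X_t Y_c : List String) :
    (PySem.List.enumerate X_t).foldl (fun df p =>
      let category := (PySem.List.pyGet? Y_c p.1).getD ""
      (PySem.Str.split₀ p.2).foldl (fun df w =>
        let df1 := if df.contains w then df else df.insert w PySem.Dict.empty
        if (df1.getD w PySem.Dict.empty).contains category then
          df1.modify w PySem.Dict.empty (fun m => m.modify category 0 (· + 1))
        else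
          df1.modify w PySem.Dict.empty (fun m => m.insert category 1)) df)
      (PySem.Dict.empty : PySem.Dict String (PySem.Dict String Int))
    = (pvP X_t Y_c).foldl (fun d p => pvAddN d p.2 p.1 1) PySem.Dict.empty := by
  rw [pvP, pv_foldl_flatMap]
  apply PySem.List.foldl_congr_mem
  intro df p _
  show _ = ((PySem.Str.split₀ p.2).map
      (fun w => (w, (PySem.List.pyGet? Y_c p.1).getD ""))).foldl
      (fun d pr => pvAddN d pr.2 pr.1 1) df
  rw [List.foldl_map]
  apply PySem.List.foldl_congr_mem
  intro d w _
  exact pv_df_step_eq d _ w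

-- B's single pass is a pair of independent flat counting loops
theorem pv_st_eq (X_t Y_c : List String) :
    (PySem.List.enumerate X_t).foldl (fun st p =>
      let cat := (PySem.List.pyGet? Y_c p.1).getD ""
      (PySem.Str.split₀ p.2).foldl (fun st w =>
        (st.1.insert (p.1, w) (st.1.getD (p.1, w) 0 + 1),
         st.2.insert (w, cat) (st.2.getD (w, cat) 0 + 1))) st)
      ((PySem.Dict.empty : PySem.Dict (Int × String) Int),
       (PySem.Dict.empty : PySem.Dict (String × String) Int))
    = ((PySem.List.enumerate X_t).foldl (fun d p =>
        (PySem.Str.split₀ p.2).foldl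
          (fun d w => d.insert (p.1, w) (d.getD (p.1, w) 0 + 1)) d) PySem.Dict.empty,
       (PySem.List.enumerate X_t).foldl (fun d p =>
        (PySem.Str.split₀ p.2).foldl
          (fun d w => d.insert (w, (PySem.List.pyGet? Y_c p.1).getD "")
            (d.getD (w, (PySem.List.pyGet? Y_c p.1).getD "") 0 + 1)) d) PySem.Dict.empty) := by
  have hbody : (fun (st : PySem.Dict (Int × String) Int × PySem.Dict (String × String) Int)
      (p : Int × String) =>
      let cat := (PySem.List.pyGet? Y_c p.1).getD ""
      (PySem.Str.split₀ p.2).foldl (fun st w =>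
        (st.1.insert (p.1, w) (st.1.getD (p.1, w) 0 + 1),
         st.2.insert (w, cat) (st.2.getD (w, cat) 0 + 1))) st)
      = (fun st p =>
        ((PySem.Str.split₀ p.2).foldl
          (fun d w => d.insert (p.1, w) (d.getD (p.1, w) 0 + 1)) st.1,
         (PySem.Str.split₀ p.2).foldl
          (fun d w => d.insert (w, (PySem.List.pyGet? Y_c p.1).getD "")
            (d.getD (w, (PySem.List.pyGet? Y_c p.1).getD "") 0 + 1)) st.2)) := by
    funext st p
    show (PySem.Str.split₀ p.2).foldl _ (st.1, st.2) = _
    rw [PySem.List.foldl_prod_mk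
      (f := fun (d : PySem.Dict (Int × String) Int) w =>
        d.insert (p.1, w) (d.getD (p.1, w) 0 + 1))
      (g := fun (d : PySem.Dict (String × String) Int) w =>
        d.insert (w, (PySem.List.pyGet? Y_c p.1).getD "")
          (d.getD (w, (PySem.List.pyGet? Y_c p.1).getD "") 0 + 1))]
  rw [hbody]
  rw [PySem.List.foldl_prod_mk
    (f := fun (d : PySem.Dict (Int × String) Int) (p : Int × String) =>
      (PySem.Str.split₀ p.2).foldl
        (fun d w => d.insert (p.1, w) (d.getD (p.1, w) 0 + 1)) d)
    (g := fun (d : PySem.Dict (String × String) Int) (p : Int × String) =>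
      (PySem.Str.split₀ p.2).foldl
        (fun d w => d.insert (w, (PySem.List.pyGet? Y_c p.1).getD "")
          (d.getD (w, (PySem.List.pyGet? Y_c p.1).getD "") 0 + 1)) d)]

-- B's word_cat counter IS the counter of the flat pair stream
theorem pv_wc_eq (X_t Y_c : List String) :
    (PySem.List.enumerate X_t).foldl (fun d p =>
        (PySem.Str.split₀ p.2).foldl
          (fun d w => d.insert (w, (PySem.List.pyGet? Y_c p.1).getD "")
            (d.getD (w, (PySem.List.pyGet? Y_c p.1).getD "") 0 + 1)) d)
      (PySem.Dict.empty : PySem.Dict (String × String) Int)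
    = PySem.Dict.counter (pvP X_t Y_c) := by
  rw [← PySem.Dict.foldl_insert_getD_add_one_eq_counter, pvP, pv_foldl_flatMap]
  apply PySem.List.foldl_congr_mem
  intro d p _
  rw [List.foldl_map]

-- B's tf0 table: every index, mapped to the empty dict, in order
theorem pv_tf0_items (X_t : List String) :
    ((PySem.List.pyRange 0 (X_t.length : Int) 1).foldl
      (fun t i => t.insert i PySem.Dict.empty)
      (PySem.Dict.empty : PySem.Dict Int (PySem.Dict String Int))).items
    = (PySem.List.enumerate X_t).map (fun p => (p.1, PySem.Dict.empty)) := by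
  have hr : PySem.List.pyRange 0 (X_t.length : Int) 1
      = (PySem.List.enumerate X_t).map Prod.fst := by
    have := PySem.List.map_fst_enumerate X_t (0 : Int)
    rw [show ((0 : Int) + X_t.length) = (X_t.length : Int) by ring] at this
    exact this.symm
  rw [hr, List.foldl_map]
  rw [PySem.Dict.items_foldl_insert_fresh (PySem.List.enumerate X_t) Prod.fst
      (fun _ => PySem.Dict.empty) PySem.Dict.empty
      (fun a _ => PySem.Dict.contains_empty _) (pv_enum_nodup X_t 0)]
  rfl

-- B's filled tf table has the same items as A's
theorem pv_tfB_items (X_t : List String) :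
    (((PySem.List.enumerate X_t).foldl (fun d p =>
        (PySem.Str.split₀ p.2).foldl
          (fun d w => d.insert (p.1, w) (d.getD (p.1, w) 0 + 1)) d)
        (PySem.Dict.empty : PySem.Dict (Int × String) Int)).items.foldl
      (fun t q => t.modify q.1.1 PySem.Dict.empty (fun m => m.insert q.1.2 q.2))
      ((PySem.List.pyRange 0 (X_t.length : Int) 1).foldl
        (fun t i => t.insert i PySem.Dict.empty) PySem.Dict.empty)).items
    = (PySem.List.enumerate X_t).map (fun p => (p.1, pvC p.2)) := by
  have hemp : (PySem.Dict.empty : PySem.Dict (Int × String) Int).items = [] := rfl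
  have hdw := pv_dw_items X_t 0 PySem.Dict.empty (by rw [hemp]; simp) (by rw [hemp]; simp)
  rw [hdw, hemp, List.nil_append]
  set tf0 := (PySem.List.pyRange 0 (X_t.length : Int) 1).foldl
    (fun t i => t.insert i PySem.Dict.empty)
    (PySem.Dict.empty : PySem.Dict Int (PySem.Dict String Int)) with htf0
  have htf0items := pv_tf0_items X_t
  rw [← htf0] at htf0items
  have htf0keys : tf0.keys = (PySem.List.enumerate X_t).map Prod.fst := by
    simp only [PySem.Dict.keys, htf0items, List.map_map]
    rfl
  have htf0nd : tf0.keys.Nodup := by rw [htf0keys]; exact pv_enum_nodup X_t 0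
  rw [pv_fill_all X_t 0 tf0 ?_ htf0nd]
  · exact pv_replace_seq (PySem.List.enumerate X_t) (fun p => pvC p.2) tf0 []
      (by simpa using htf0items) (by simp) (pv_enum_nodup X_t 0)
  · intro p hp
    have hck : tf0.contains p.1 = true := by
      rw [PySem.Dict.contains_iff_mem_keys, htf0keys]
      exact List.mem_map.mpr ⟨p, hp, rfl⟩
    refine ⟨hck, ?_⟩
    have hmem : (p.1, (PySem.Dict.empty : PySem.Dict String Int)) ∈ tf0.items := by
      rw [htf0items]; exact List.mem_map.mpr ⟨p, hp, rfl⟩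
    exact PySem.Dict.getD_of_mem_items (d := tf0) hmem htf0nd PySem.Dict.empty

-- B's grouped df equals A's df
theorem pv_dfB_eq (X_t Y_c : List String) :
    (PySem.Dict.counter (pvP X_t Y_c)).items.foldl (fun d q =>
      (d.setdefault q.1.1 PySem.Dict.empty).modify q.1.1 PySem.Dict.empty
        (fun m => m.insert q.1.2 q.2)) PySem.Dict.empty
    = (pvP X_t Y_c).foldl (fun d p => pvAddN d p.2 p.1 1) PySem.Dict.empty := by
  have h1 : (PySem.Dict.counter (pvP X_t Y_c)).items.foldl (fun d q =>
      (d.setdefault q.1.1 PySem.Dict.empty).modify q.1.1 PySem.Dict.empty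
        (fun m => m.insert q.1.2 q.2)) PySem.Dict.empty
      = (PySem.Dict.counter (pvP X_t Y_c)).items.foldl pvAssign PySem.Dict.empty := rfl
  rw [h1, pv_assign_fold _ _ (pv_counter_nodup_fst _) ?_, pv_stream_eq]
  intro q _
  rw [PySem.Dict.getD_empty]
  exact PySem.Dict.contains_empty _

-- ===== VERDICT (by name: the statement is the Claim_ definition above) =====
theorem get_df_icf_matrix_spec : Claim_equal_get_df_icf_matrix := by
  intro X_t Y_c _hdom _hpre
  unfold Spec_get_df_icf_matrix
  have h1 : (get_df_icf_matrix X_t Y_c).1 = (get_df_icf_matrix_alt X_t Y_c).1 := by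
    simp only [get_df_icf_matrix, get_df_icf_matrix_alt, pv_st_eq]
    rw [pv_tfA_step, pv_tf_canonical, pv_tfB_items]
  have h2 : (get_df_icf_matrix X_t Y_c).2 = (get_df_icf_matrix_alt X_t Y_c).2 := by
    simp only [get_df_icf_matrix, get_df_icf_matrix_alt, pv_st_eq]
    rw [pv_dfA_eq, pv_wc_eq, pv_dfB_eq]
  rw [show get_df_icf_matrix X_t Y_c
      = ((get_df_icf_matrix X_t Y_c).1, (get_df_icf_matrix X_t Y_c).2) from rfl, h1, h2]
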